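-- pv_equiv track=rewrite | github.com/swappimittal/PPset_2 | PPSET_functions.py | remove_3G_3C
-- ===== SOURCE A (Python) =====
-- def remove_3G_3C(probe_list):
--     filtered_probe_list = []
--     for sub_sequence in probe_list:
--         exclude_sub_sequence = False
--         for i in range(len(sub_sequence) - 2):
--             if (
--                 sub_sequence[i:i + 3] == ['G', 'G', 'G'] or
--                 sub_sequence[i:i + 3] == ['C', 'C', 'C']
--             ):
--                 exclude_sub_sequence = True
--                 break
--         if not exclude_sub_sequence:
--             filtered_probe_list.append(sub_sequence)
--     return filtered_probe_list
-- ===== SOURCE B (Python) =====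
-- def remove_3G_3C(probe_list):
--     def ok(sub):
--         prev = None
--         run = 0
--         for x in sub:
--             if x == prev:
--                 run += 1
--             else:
--                 prev = x
--                 run = 1
--             if run >= 3 and (x == 'G' or x == 'C'):
--                 return False
--         return True
--     return [sub for sub in probe_list if ok(sub)]
-- ===== Notes on version B (the rewrite author's own statement) =====
-- stated objective: faster
-- what changed: Replaces the 3-element slice comparisons over all window start indices with a single run-length counter pass (prev element + consecutive-run count) that stops at the first run of 3 G's or C's, and builds the result by a filter comprehension.
import Mathlib
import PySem

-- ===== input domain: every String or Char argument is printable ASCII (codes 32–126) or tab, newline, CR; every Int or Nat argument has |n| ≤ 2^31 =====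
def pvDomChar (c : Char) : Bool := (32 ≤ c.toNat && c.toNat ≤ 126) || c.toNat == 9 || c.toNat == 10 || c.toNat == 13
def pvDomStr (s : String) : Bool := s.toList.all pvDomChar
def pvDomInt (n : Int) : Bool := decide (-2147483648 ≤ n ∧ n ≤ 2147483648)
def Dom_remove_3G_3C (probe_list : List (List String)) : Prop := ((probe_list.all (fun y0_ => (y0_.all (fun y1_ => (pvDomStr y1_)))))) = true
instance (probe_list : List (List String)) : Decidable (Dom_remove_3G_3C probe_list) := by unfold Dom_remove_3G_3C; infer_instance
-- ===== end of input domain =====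

-- B replaces A's per-index 3-element slice comparisons with a single run-length-counter pass
-- (prev element + consecutive-run count) and a filter comprehension: an alternative decomposition.


-- ===== PORT A =====
-- A's inner loop: for i in range(len(sub) - 2): compare sub[i:i+3] with ['G','G','G'] / ['C','C','C'], break on match
def pvA_loop (s : List String) (n : Nat) (i : Nat) : Bool :=
  if _h : i < n then
    if PySem.List.slice s (some (i : Int)) (some ((i : Int) + 3)) = ["G", "G", "G"] ∨
       PySem.List.slice s (some (i : Int)) (some ((i : Int) + 3)) = ["C", "C", "C"] then
      true
    else
      pvA_loop s n (i + 1)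
  else
    false
termination_by n - i

def remove_3G_3C (probe_list : List (List String)) : List (List String) :=
  probe_list.foldl
    (fun filtered_probe_list sub_sequence =>
      -- exclude_sub_sequence computed by the inner index loop (break = early true);
      -- 'if not exclude: append'
      if !pvA_loop sub_sequence (sub_sequence.length - 2) 0 then
        filtered_probe_list ++ [sub_sequence]
      else
        filtered_probe_list)
    []

-- ===== PORT B =====
-- B's ok(sub): one pass keeping prev (Option, starts None) and run; False at the first run of 3 G/C
def pvB_ok : List String → Option String → Nat → Bool
  | [], _, _ => true
  | x :: rest, prev, run =>
    let run' := if prev = some x then run + 1 else 1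
    if 3 ≤ run' ∧ (x = "G" ∨ x = "C") then false
    else pvB_ok rest (some x) run'

def remove_3G_3C_alt (probe_list : List (List String)) : List (List String) :=
  probe_list.filter (fun sub => pvB_ok sub none 0)

-- ===== PRECONDITION & SPEC =====
def Spec_remove_3G_3C (probe_list : List (List String)) (out : List (List String)) : Prop := out = remove_3G_3C_alt probe_list
instance (probe_list : List (List String)) (out : List (List String)) : Decidable (Spec_remove_3G_3C probe_list out) := by unfold Spec_remove_3G_3C; infer_instance

-- ===== CLAIM (what is proved, stated in full; the proofs are below) =====
def Claim_equal_remove_3G_3C : Prop := ∀ (probe_list : List (List String)), Dom_remove_3G_3C probe_list → Spec_remove_3G_3C probe_list (remove_3G_3C probe_list)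

-- ===== LEMMAS AND PROOFS =====

-- a reference predicate: some window of 3 consecutive equal 'G's or 'C's exists
def trip : List String → Bool
  | a :: b :: c :: rest =>
    if (a = "G" ∧ b = "G" ∧ c = "G") ∨ (a = "C" ∧ b = "C" ∧ c = "C") then true
    else trip (b :: c :: rest)
  | _ => false

lemma trip_short (l : List String) (h : l.length < 3) : trip l = false := by
  match l with
  | [] => rfl
  | [_] => rfl
  | [_, _] => rfl
  | _ :: _ :: _ :: _ => simp at h; omega

lemma trip_cons_ne (p x : String) (rest : List String) (h : p ≠ x) :
    trip (p :: x :: rest) = trip (x :: rest) := by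
  cases rest with
  | nil => rfl
  | cons y r =>
    rw [trip, if_neg]
    rintro (⟨h1, h2, _⟩ | ⟨h1, h2, _⟩) <;> exact h (h1.trans h2.symm)

lemma pvA_loop_eq_trip_aux (s : List String) :
    ∀ (k i : Nat), s.length - 2 - i ≤ k →
      pvA_loop s (s.length - 2) i = trip (s.drop i) := by
  intro k
  induction k with
  | zero =>
    intro i hk
    have h : ¬ i < s.length - 2 := by omega
    rw [pvA_loop, dif_neg h]
    rw [trip_short]
    simp
    omega
  | succ k ih =>
    intro i hk
    by_cases h : i < s.length - 2
    · have hlen : 3 ≤ (s.drop i).length := by simp; omega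
      obtain ⟨a, b, c, rest, hd⟩ : ∃ a b c rest, s.drop i = a :: b :: c :: rest := by
        rcases e : s.drop i with _ | ⟨a, _ | ⟨b, _ | ⟨c, rest⟩⟩⟩ <;>
          rw [e] at hlen <;> simp at hlen
        exact ⟨a, b, c, rest, rfl⟩
      have hslice : PySem.List.slice s (some (i : Int)) (some ((i : Int) + 3)) = [a, b, c] := by
        rw [show ((i : Int) + 3) = ((i : Int) + ((3 : Nat) : Int)) by norm_num,
          PySem.List.slice_natCast_add, hd]
        rfl
      have hdrop1 : s.drop (i + 1) = b :: c :: rest := by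
        rw [← List.drop_drop, List.drop_one, hd]
        rfl
      rw [pvA_loop, dif_pos h, hslice, hd, trip]
      have hcond : ([a, b, c] = ["G", "G", "G"] ∨ [a, b, c] = ["C", "C", "C"]) ↔
          ((a = "G" ∧ b = "G" ∧ c = "G") ∨ (a = "C" ∧ b = "C" ∧ c = "C")) := by
        simp
      by_cases hc : ((a = "G" ∧ b = "G" ∧ c = "G") ∨ (a = "C" ∧ b = "C" ∧ c = "C"))
      · rw [if_pos (hcond.mpr hc), if_pos hc]
      · rw [if_neg (fun hx => hc (hcond.mp hx)), if_neg hc, ih (i + 1) (by omega), hdrop1]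
    · rw [pvA_loop, dif_neg h, trip_short]
      simp
      omega

lemma pvA_loop_eq_trip (s : List String) :
    pvA_loop s (s.length - 2) 0 = trip s := by
  have := pvA_loop_eq_trip_aux s (s.length - 2) 0 (by omega)
  simpa using this

lemma pvB_ok_eq_trip (s : List String) :
    ∀ (p : String) (r : Nat), 1 ≤ r →
      pvB_ok s (some p) r = !(trip ((if 2 ≤ r then [p, p] else [p]) ++ s)) := by
  induction s with
  | nil =>
    intro p r _
    split_ifs <;> simp [pvB_ok, trip]
  | cons x rest ih =>
    intro p r hr
    rw [pvB_ok]
    by_cases hx : p = x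
    · subst hx
      simp only [if_true]
      by_cases hgc : p = "G" ∨ p = "C"
      · by_cases hr2 : 2 ≤ r
        · rw [if_pos ⟨by omega, hgc⟩, if_pos hr2]
          have ht : trip (p :: p :: p :: rest) = true := by
            rw [trip, if_pos]
            rcases hgc with h | h <;> [left; right] <;> exact ⟨h, h, h⟩
          rw [show ([p, p] ++ p :: rest) = p :: p :: p :: rest from rfl, ht]
          rfl
        · rw [if_neg (by omega : ¬ (3 ≤ r + 1 ∧ (p = "G" ∨ p = "C"))),
            ih p (r + 1) (by omega), if_pos (by omega : 2 ≤ r + 1), if_neg hr2]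
          rfl
      · rw [if_neg (fun hcc => hgc hcc.2), ih p (r + 1) (by omega),
          if_pos (by omega : 2 ≤ r + 1)]
        by_cases hr2 : 2 ≤ r
        · rw [if_pos hr2]
          congr 1
          rw [show ([p, p] ++ p :: rest) = p :: p :: p :: rest from rfl, trip, if_neg]
          · rfl
          · rintro (⟨h1, _, _⟩ | ⟨h1, _, _⟩) <;> exact hgc (by simp [h1])
        · rw [if_neg hr2]
          rfl
    · simp only [Option.some.injEq, if_neg hx]
      rw [if_neg (by omega : ¬ (3 ≤ 1 ∧ (x = "G" ∨ x = "C"))), ih x 1 (by omega),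
        if_neg (by omega : ¬ (2 ≤ 1))]
      congr 1
      by_cases hr2 : 2 ≤ r
      · rw [if_pos hr2]
        have h2 : trip (p :: p :: x :: rest) = trip (p :: x :: rest) := by
          rw [trip, if_neg]
          rintro (⟨h1, _, h3⟩ | ⟨h1, _, h3⟩) <;> exact hx (h1.trans h3.symm)
        rw [show ([p, p] ++ x :: rest) = p :: p :: x :: rest from rfl, h2,
          trip_cons_ne p x rest hx]
        rfl
      · rw [if_neg hr2, show ([p] ++ x :: rest) = p :: x :: rest from rfl,
          trip_cons_ne p x rest hx]
        rfl

lemma pvB_none_eq_trip (s : List String) : pvB_ok s none 0 = !trip s := by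
  cases s with
  | nil => rfl
  | cons x rest =>
    rw [pvB_ok]
    rw [if_neg (by simp : ¬ ((none : Option String) = some x))]
    rw [if_neg (by omega : ¬ (3 ≤ 1 ∧ (x = "G" ∨ x = "C"))),
      pvB_ok_eq_trip rest x 1 (by omega), if_neg (by omega : ¬ (2 ≤ 1))]
    rfl

-- ===== VERDICT (by name: the statement is the Claim_ definition above) =====
theorem remove_3G_3C_spec : Claim_equal_remove_3G_3C := by
  intro probe_list _
  unfold Spec_remove_3G_3C remove_3G_3C remove_3G_3C_alt
  have h := PySem.List.foldl_append_if (fun sub : List String => !pvA_loop sub (sub.length - 2) 0) id probe_list []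
  simp only [id_eq, List.nil_append, List.map_id] at h
  rw [h]
  apply List.filter_congr
  intro sub _
  rw [pvA_loop_eq_trip, pvB_none_eq_trip]
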